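-- pv_equiv track=rewrite | github.com/ttyomaaa/P1430_MIEM_bot | app/ciphers/cipher.py | cipher12
-- ===== SOURCE A (Python) =====
-- def cipher12(input_text: str, key: int, mode: bool):
--     # Скитала
--     if mode == 0:
--         if key >= len(input_text):
--             raise ValueError("Incorrect input")
--
--         while len(input_text)%key != 0:
--             input_text += "_"
--         cols = int(len(input_text)/key)
--         data = [[char for char in input_text[i * cols: (i + 1) * cols]] for i in range(key)]
--         result = ""
--         while len(data[key-1]) != cols:
--             data[key-1].append('_')
--         for i in range(0, cols, 1):
--             for k in range(0, key, 1)       :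
--                 if data[k][i] == ' ': data[k][i] = '_'
--                 result += data[k][i]
--
--     elif mode == 1:
--         if len(input_text) % key != 0:
--             raise ValueError("Incorrect input")
--
--         rows = int(len(input_text)/key)
--         data = [[char for char in input_text[i * key: (i + 1) * key]] for i in range(rows)]
--         result = ""
--         for i in range(0, key, 1):
--             for k in range(0, rows, 1):
--                 if data[k][i] == '_': data[k][i] = ' '
--                 result += data[k][i]
--
--     return result.rstrip()
-- ===== SOURCE B (Python) =====
-- def cipher12(input_text: str, key: int, mode: bool):
--     # Scytale transposition, grid-free: the column-major read of the k x c grid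
--     # is the concatenation of the strided slices text[i::stride].
--     if mode == 0:
--         if key >= len(input_text):
--             raise ValueError("Incorrect input")
--         while len(input_text) % key != 0:
--             input_text += "_"
--         cols = len(input_text) // key
--         padded = input_text.replace(' ', '_')
--         result = ''.join(padded[i::cols] for i in range(cols))
--     else:
--         if len(input_text) % key != 0:
--             raise ValueError("Incorrect input")
--         s = input_text.replace('_', ' ')
--         result = ''.join(s[i::key] for i in range(key))
--     return result.rstrip()
-- ===== Notes on version B (the rewrite author's own statement) =====
-- stated objective: idiomatic
-- what changed: B drops A's explicit 2-D grid (list-of-lists rows, last-row fill loop, in-place cell rewrites and nested column-major read loops) and instead does one str.replace followed by joining the strided slices text[i::stride], which is the transpose directly.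
import Mathlib
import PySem

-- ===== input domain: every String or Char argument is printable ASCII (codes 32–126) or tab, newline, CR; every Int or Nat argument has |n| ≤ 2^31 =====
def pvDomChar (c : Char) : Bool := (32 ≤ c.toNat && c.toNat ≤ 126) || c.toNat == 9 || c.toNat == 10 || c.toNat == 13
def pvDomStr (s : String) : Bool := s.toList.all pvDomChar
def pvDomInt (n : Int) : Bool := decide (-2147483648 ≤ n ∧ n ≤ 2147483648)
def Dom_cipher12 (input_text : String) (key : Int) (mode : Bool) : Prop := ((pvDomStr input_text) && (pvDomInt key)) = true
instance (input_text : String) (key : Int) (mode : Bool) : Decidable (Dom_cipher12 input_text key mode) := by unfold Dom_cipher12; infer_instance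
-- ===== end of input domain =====

-- B replaces A's explicit 2-D grid and nested read loops by replace + strided slicing (text[i::stride]); objective: idiomatic.


-- ===== PORT A =====
-- the padding loop `while len(input_text) % key != 0: input_text += "_"`, verbatim in both
-- A and B; ported with fuel |key|, which covers every terminating run of the Python loop
-- (the loop needs < |key| iterations when key ≠ 0; key = 0 raises ZeroDivisionError, outside Pre_).
def pvPadFuel : Nat → List Char → Int → List Char
  | 0, t, _ => t
  | n+1, t, k => if PySem.Int.mod (t.length : Int) k = 0 then t else pvPadFuel n (t ++ ['_']) k

-- A's `while len(data[key-1]) != cols: data[key-1].append('_')`; fuel cols.toNat covers every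
-- terminating run (the loop body runs cols - len iterations when len < cols; never more inside Pre_).
def pvFillFuel : Nat → List Char → Int → List Char
  | 0, r, _ => r
  | n+1, r, c => if (r.length : Int) = c then r else pvFillFuel n (r ++ ['_']) c

def cipher12 (input_text : String) (key : Int) (mode : Bool) : String :=
  if mode = false then
    let t0 := input_text.toList
    if (t0.length : Int) ≤ key then "" -- Python: raise ValueError("Incorrect input"); excluded by Pre_
    else
      let t := pvPadFuel key.natAbs t0 key
      -- cols = int(len/key): float division, exact on Pre_ (key ∣ len and both are small), ported as floor division
      let cols := PySem.Int.floordiv (t.length : Int) key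
      let data := (PySem.List.pyRange 0 key).map (fun i => PySem.List.slice t (some (i * cols)) (some ((i+1) * cols)))
      -- while len(data[key-1]) != cols: data[key-1].append('_')  (mutates row key-1 only; key ≥ 1 on Pre_, so key-1 is a plain index)
      let data := data.modify (key - 1).toNat (fun r => pvFillFuel cols.toNat r cols)
      -- for i in range(cols): for k in range(key): if data[k][i]==' ': data[k][i]='_'; result += data[k][i]
      -- (each cell is read once and data is dead afterwards, so the in-place write is observable only in the appended char)
      let result := (PySem.List.pyRange 0 cols).foldl (fun acc i =>
        (PySem.List.pyRange 0 key).foldl (fun acc2 k =>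
          acc2 ++ [if PySem.List.pyGetD (PySem.List.pyGetD data k []) i ' ' = ' ' then '_'
                   else PySem.List.pyGetD (PySem.List.pyGetD data k []) i ' ']) acc) []
      String.ofList (PySem.Chars.rstrip result)
  else
    let t0 := input_text.toList
    if PySem.Int.mod (t0.length : Int) key ≠ 0 then "" -- Python: raise ValueError("Incorrect input"); excluded by Pre_
    else
      let rows := PySem.Int.floordiv (t0.length : Int) key  -- int(len/key), exact on Pre_ as above
      let data := (PySem.List.pyRange 0 rows).map (fun i => PySem.List.slice t0 (some (i * key)) (some ((i+1) * key)))
      let result := (PySem.List.pyRange 0 key).foldl (fun acc i =>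
        (PySem.List.pyRange 0 rows).foldl (fun acc2 k =>
          acc2 ++ [if PySem.List.pyGetD (PySem.List.pyGetD data k []) i ' ' = '_' then ' '
                   else PySem.List.pyGetD (PySem.List.pyGetD data k []) i ' ']) acc) []
      String.ofList (PySem.Chars.rstrip result)

-- ===== PORT B =====
def cipher12_alt (input_text : String) (key : Int) (mode : Bool) : String :=
  if mode = false then
    let t0 := input_text.toList
    if (t0.length : Int) ≤ key then "" -- raise ValueError("Incorrect input"); excluded by Pre_
    else
      let t := pvPadFuel key.natAbs t0 key   -- the same verbatim while-padding loop as in A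
      let cols := PySem.Int.floordiv (t.length : Int) key
      let padded := PySem.Chars.replace t [' '] ['_']
      -- ''.join(padded[i::cols] for i in range(cols)); cols ≥ 1 on Pre_, so the step is never 0 (.getD [] unreachable)
      let result := PySem.Chars.join []
        ((PySem.List.pyRange 0 cols).map (fun i => (PySem.List.slice? padded (some i) none cols).getD []))
      String.ofList (PySem.Chars.rstrip result)
  else
    let t0 := input_text.toList
    if PySem.Int.mod (t0.length : Int) key ≠ 0 then "" -- raise ValueError("Incorrect input"); excluded by Pre_
    else
      let s := PySem.Chars.replace t0 ['_'] [' ']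
      -- ''.join(s[i::key] for i in range(key)); the range is nonempty only for key ≥ 1 ≠ 0 (.getD [] unreachable)
      let result := PySem.Chars.join []
        ((PySem.List.pyRange 0 key).map (fun i => (PySem.List.slice? s (some i) none key).getD []))
      String.ofList (PySem.Chars.rstrip result)

-- ===== PRECONDITION & SPEC =====
-- Pre_ excludes exactly the inputs on which A raises: encode (mode=0) raises unless 1 ≤ key < len
-- (ValueError for key ≥ len, ZeroDivisionError for key = 0, IndexError at data[key-1] for key < 0);
-- decode (mode=1) raises unless key ≠ 0 divides len (ValueError / ZeroDivisionError).
def Pre_cipher12 (input_text : String) (key : Int) (mode : Bool) : Prop :=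
  if mode = false then 1 ≤ key ∧ key < (input_text.toList.length : Int)
  else key ≠ 0 ∧ PySem.Int.mod (input_text.toList.length : Int) key = 0
instance (input_text : String) (key : Int) (mode : Bool) : Decidable (Pre_cipher12 input_text key mode) := by
  unfold Pre_cipher12; infer_instance

def pvWitness_cipher12 : String × Int × Bool := ("hello", 2, false)

def Spec_cipher12 (input_text : String) (key : Int) (mode : Bool) (out : String) : Prop := out = cipher12_alt input_text key mode
instance (input_text : String) (key : Int) (mode : Bool) (out : String) : Decidable (Spec_cipher12 input_text key mode out) := by unfold Spec_cipher12; infer_instance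

-- ===== CLAIM (what is proved, stated in full; the proofs are below) =====
def Claim_equal_cipher12 : Prop := ∀ (input_text : String) (key : Int) (mode : Bool), Dom_cipher12 input_text key mode → Pre_cipher12 input_text key mode → Spec_cipher12 input_text key mode (cipher12 input_text key mode)



-- ===== LEMMAS AND PROOFS =====

lemma pvPadFuel_length_le (k : Int) : ∀ (n : Nat) (t : List Char), t.length ≤ (pvPadFuel n t k).length := by
  intro n
  induction n with
  | zero => intro t; simp [pvPadFuel]
  | succ m ih =>
    intro t
    simp only [pvPadFuel]
    split
    · exact le_refl _
    · have := ih (t ++ ['_'])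
      simp at this
      omega

lemma pvPadFuel_mod (k : Int) (hk : 0 < k) : ∀ (n : Nat) (t : List Char),
    (PySem.Int.mod (t.length : Int) k ≠ 0 → k - PySem.Int.mod (t.length : Int) k ≤ n) →
    PySem.Int.mod (((pvPadFuel n t k).length : Int)) k = 0 := by
  intro n
  induction n with
  | zero =>
    intro t h
    simp only [pvPadFuel]
    by_cases h0 : PySem.Int.mod (t.length : Int) k = 0
    · exact h0
    · have h1 := PySem.Int.mod_lt (a := (t.length : Int)) hk
      have h2 := h h0
      omega
  | succ m ih =>
    intro t h
    simp only [pvPadFuel]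
    split
    · assumption
    · rename_i hne
      apply ih
      intro hne'
      simp only [List.length_append, List.length_cons, List.length_nil] at hne' ⊢
      have e1 : ((t.length + 1 : Nat) : Int) = (t.length : Int) + 1 := by push_cast; ring
      rw [e1] at hne' ⊢
      have hmodlt := PySem.Int.mod_lt (a := (t.length : Int)) hk
      have hmodnn := PySem.Int.mod_nonneg (a := (t.length : Int)) hk
      have h2 := h hne
      rw [PySem.Int.mod_eq_emod_of_pos hk] at *
      have hk2 : (1 : Int) < k := by
        by_contra hh
        have hk1 : k = 1 := by omega
        subst hk1
        simp at hne
      have h1k : (1 : Int) % k = 1 := Int.emod_eq_of_lt (by norm_num) hk2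
      have hstep : ((t.length : Int) + 1) % k = ((t.length : Int) % k + 1) % k := by
        rw [Int.add_emod, h1k]
      by_cases hc : (t.length : Int) % k + 1 = k
      · rw [hstep, hc] at hne'
        simp at hne'
      · have hfin : ((t.length : Int) + 1) % k = (t.length : Int) % k + 1 := by
          rw [hstep]
          exact Int.emod_eq_of_lt (by omega) (by omega)
        omega

lemma pvFillFuel_id (n : Nat) (r : List Char) (c : Int) (h : (r.length : Int) = c) :
    pvFillFuel n r c = r := by
  cases n with
  | zero => rfl
  | succ m => simp [pvFillFuel, h]

lemma pvModify_congr_id {α : Type} (f : α → α) : ∀ (l : List α) (i : Nat),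
    (∀ x ∈ l, f x = x) → l.modify i f = l := by
  intro l
  induction l with
  | nil => intro i _; simp
  | cons a t ih =>
    intro i h
    cases i with
    | zero => simp [List.modify, h a (by simp)]
    | succ j =>
      have hc : (a :: t).modify (j+1) f = a :: t.modify j f := rfl
      rw [hc, ih j (fun x hx => h x (by simp [hx]))]

lemma pvFlatMapCongr {α β : Type} {l : List α} {f g : α → List β} (h : ∀ a ∈ l, f a = g a) :
    l.flatMap f = l.flatMap g := by
  rw [List.flatMap_def, List.flatMap_def, List.map_congr_left h]

lemma pvGoNil (a b : Char) (fuel : Nat) (acc : List Char) :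
    PySem.Chars.replace.go [a] [b] fuel [] acc = acc.reverse := by
  cases fuel <;> (unfold PySem.Chars.replace.go; simp)

lemma pvGoCons (a b c : Char) (t : List Char) (m : Nat) (acc : List Char) :
    PySem.Chars.replace.go [a] [b] (m+1) (c :: t) acc =
      (if c = a then PySem.Chars.replace.go [a] [b] m t (b :: acc)
       else PySem.Chars.replace.go [a] [b] m t (c :: acc)) := by
  conv_lhs => unfold PySem.Chars.replace.go
  by_cases h : c = a <;> simp [List.isPrefixOf, h, BEq.symm_false]

lemma pvGoSingle (a b : Char) : ∀ (l : List Char) (fuel : Nat) (acc : List Char), l.length ≤ fuel →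
    PySem.Chars.replace.go [a] [b] fuel l acc = acc.reverse ++ l.map (fun c => if c = a then b else c) := by
  intro l
  induction l with
  | nil => intro fuel acc _; simp [pvGoNil]
  | cons c t ih =>
    intro fuel acc hf
    cases fuel with
    | zero => simp at hf
    | succ m =>
      rw [pvGoCons]
      have hm : t.length ≤ m := by simp at hf; omega
      by_cases h : c = a <;> simp [h, ih _ _ hm]

-- replace with a single-character pattern is a pointwise map
lemma pvReplace_single (a b : Char) (s : List Char) :
    PySem.Chars.replace s [a] [b] = s.map (fun c => if c = a then b else c) := by
  unfold PySem.Chars.replace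
  simp [pvGoSingle a b s s.length [] (le_refl _)]

lemma pvJoin_empty (ps : List (List Char)) : PySem.Chars.join [] ps = ps.flatten := by
  unfold PySem.Chars.join
  induction ps with
  | nil => rfl
  | cons h t ih =>
    cases t with
    | nil => simp [List.intercalate]
    | cons h2 t2 =>
      simp only [List.intercalate, List.intersperse, List.flatten] at ih ⊢
      simp_all

-- p[i::W] (0 < W, i < W) on a list of length R*W is the list of strides p[k*W + i], k < R
lemma pvSliceStride (p : List Char) (i R W : Nat) (hW : 0 < W) (hi : i < W) (hlen : p.length = R * W) :
    PySem.List.slice? p (some (i : Int)) none (W : Int)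
      = some ((List.range R).map (fun k => p.getD (k * W + i) ' ')) := by
  have hW0 : ((W : Int)) ≠ 0 := by exact_mod_cast hW.ne'
  have hWneg : ¬((W : Int) < 0) := by omega
  have hWpos : (0 : Int) < (W : Int) := by exact_mod_cast hW
  have hiNeg : ¬((i : Int) < 0) := by omega
  simp only [PySem.List.slice?, PySem.List.sliceIndices, if_neg hW0, if_neg hWneg, if_neg hiNeg,
    if_pos hWpos]
  rcases Nat.eq_zero_or_pos R with hR | hR
  · subst hR
    simp only [Nat.zero_mul, List.length_eq_zero_iff] at hlen
    subst hlen
    simp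
  · have hiRW : i < R * W := lt_of_lt_of_le hi (Nat.le_mul_of_pos_left _ hR)
    have hiL : (i : Int) < (p.length : Int) := by rw [hlen]; exact_mod_cast hiRW
    have hmin : min ((i : Int)) ((p.length : Int)) = (i : Int) := min_eq_left (le_of_lt hiL)
    rw [hmin, if_pos hiL]
    have hcnt : ((p.length : Int) - (i : Int) + (W : Int) - 1) / (W : Int) = (R : Int) := by
      have he : ((p.length : Int) - (i : Int) + (W : Int) - 1)
          = ((W : Int) - 1 - (i : Int)) + (R : Int) * (W : Int) := by
        rw [hlen]; push_cast; ring
      rw [he, Int.add_mul_ediv_right _ _ hW0,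
        Int.ediv_eq_zero_of_lt (by omega) (by omega), zero_add]
    rw [hcnt, Int.toNat_natCast]
    have hcg : List.filterMap (fun x : Nat => p[((i : Int) + (W : Int) * (x : Int)).toNat]?) (List.range R)
        = List.filterMap (fun x : Nat => some (p.getD (x * W + i) ' ')) (List.range R) := by
      apply List.filterMap_congr
      intro a ha
      simp only [List.mem_range] at ha
      have hidx : a * W + i < p.length := by
        rw [hlen]
        calc a * W + i < a * W + W := by omega
          _ = (a + 1) * W := by ring
          _ ≤ R * W := Nat.mul_le_mul_right _ (by omega)
      have hcast : ((i : Int) + (W : Int) * (a : Int)).toNat = a * W + i := by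
        have hh : ((i : Int) + (W : Int) * (a : Int)) = ((a * W + i : Nat) : Int) := by push_cast; ring
        rw [hh, Int.toNat_natCast]
      rw [hcast, List.getElem?_eq_getElem hidx, List.getD_eq_getElem p ' ' hidx]
    rw [hcg]
    simp

-- A's column-major read of the R×W grid of row slices, with the in-place x→y rewrite at each cell
lemma pvGridRead (p : List Char) (x y : Char) (R W : Nat) (hlen : p.length = R * W) :
    ((PySem.List.pyRange 0 (W : Int)).foldl (fun acc i =>
        (PySem.List.pyRange 0 (R : Int)).foldl (fun acc2 k =>
          acc2 ++ [if PySem.List.pyGetD (PySem.List.pyGetD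
              ((PySem.List.pyRange 0 (R : Int)).map
                (fun j => PySem.List.slice p (some (j * (W : Int))) (some ((j+1) * (W : Int))))) k []) i ' ' = x
            then y
            else PySem.List.pyGetD (PySem.List.pyGetD
              ((PySem.List.pyRange 0 (R : Int)).map
                (fun j => PySem.List.slice p (some (j * (W : Int))) (some ((j+1) * (W : Int))))) k []) i ' ']) acc) [])
      = (List.range W).flatMap (fun i => (List.range R).map
          (fun k => (p.map (fun c => if c = x then y else c)).getD (k * W + i) ' ')) := by
  simp only [PySem.List.foldl_append_singleton_eq_map, PySem.List.foldl_append_eq_flatMap,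
    List.nil_append]
  rw [PySem.List.pyRange_zero_natCast W, PySem.List.pyRange_zero_natCast R]
  rw [List.flatMap_map]
  apply pvFlatMapCongr
  intro i hi
  have hiW : i < W := List.mem_range.mp hi
  rw [List.map_map]
  apply List.map_congr_left
  intro k hk
  have hkR : k < R := List.mem_range.mp hk
  simp only [Function.comp_apply]
  have hidx : k * W + i < p.length := by
    rw [hlen]
    calc k * W + i < k * W + W := by omega
      _ = (k + 1) * W := by ring
      _ ≤ R * W := Nat.mul_le_mul_right _ (by omega)
  have hcell : PySem.List.pyGetD (PySem.List.pyGetD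
      (List.map (fun j : Int => PySem.List.slice p (some (j * (W : Int))) (some ((j+1) * (W : Int))))
        (List.map (fun n : Nat => (n : Int)) (List.range R))) (k : Int) []) (i : Int) ' '
      = p.getD (k * W + i) ' ' := by
    rw [List.map_map]
    simp only [PySem.List.pyGetD_natCast]
    rw [PySem.List.getD_map_range _ _ _ _ hkR]
    simp only [Function.comp_apply]
    have e1 : ((k : Int)) * (W : Int) = ((k * W : Nat) : Int) := by push_cast; ring
    have e2 : ((k : Int) + 1) * (W : Int) = ((k * W + W : Nat) : Int) := by push_cast; ring
    rw [e1, e2, PySem.List.slice_natCast]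
    have e3 : k * W + W - k * W = W := by omega
    rw [e3]
    rw [List.getD_eq_getElem?_getD, List.getElem?_take, if_pos hiW, List.getElem?_drop,
      List.getD_eq_getElem?_getD]
  rw [hcell]
  rw [List.getD_eq_getElem p ' ' hidx,
    List.getD_eq_getElem (p.map fun c => if c = x then y else c) ' ' (by simpa using hidx),
    List.getElem_map]

-- B's joined strides equal the same canonical form
lemma pvStrideRead (p : List Char) (R W : Nat) (hW : 0 < W) (hlen : p.length = R * W) :
    PySem.Chars.join [] ((PySem.List.pyRange 0 (W : Int)).map
        (fun i => (PySem.List.slice? p (some i) none (W : Int)).getD []))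
      = (List.range W).flatMap (fun i => (List.range R).map (fun k => p.getD (k * W + i) ' ')) := by
  rw [pvJoin_empty, PySem.List.pyRange_zero_natCast W, List.map_map, ← List.flatMap_def]
  apply pvFlatMapCongr
  intro i hi
  simp only [Function.comp_apply]
  rw [pvSliceStride p i R W hW (List.mem_range.mp hi) hlen]
  rfl

-- ===== VERDICT (by name: the statement is the Claim_ definition above) =====
theorem cipher12_spec : Claim_equal_cipher12 := by
  intro s key mode _hdom hpre
  unfold Spec_cipher12
  cases mode with
  | false =>
    have hpre' : 1 ≤ key ∧ key < ((s.toList.length : Nat) : Int) := by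
      simpa [Pre_cipher12] using hpre
    obtain ⟨hk1, hklen⟩ := hpre'
    have hg : ¬((s.toList.length : Int) ≤ key) := by omega
    unfold cipher12 cipher12_alt
    simp only [reduceIte]
    rw [if_neg hg, if_neg hg]
    have hkey : key = ((key.toNat : Nat) : Int) := by omega
    set K := key.toNat with hKdef
    have hKpos : 0 < K := by omega
    have hKposI : (0 : Int) < (K : Int) := by exact_mod_cast hKpos
    rw [hkey]
    simp only [Int.natAbs_natCast]
    set t := pvPadFuel K s.toList (K : Int) with ht
    have hmodK : PySem.Int.mod (t.length : Int) (K : Int) = 0 := by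
      apply pvPadFuel_mod (K : Int) hKposI K s.toList
      intro hne
      have h1 := PySem.Int.mod_nonneg (a := ((s.toList.length : Nat) : Int)) hKposI
      have h2 := PySem.Int.mod_lt (a := ((s.toList.length : Nat) : Int)) hKposI
      omega
    have hlen_le : s.toList.length ≤ t.length := pvPadFuel_length_le _ _ _
    have hdvdN : K ∣ t.length := by
      have hdvd : ((K : Nat) : Int) ∣ ((t.length : Nat) : Int) :=
        (PySem.Int.mod_eq_zero_iff_dvd _ _).mp hmodK
      exact_mod_cast hdvd
    set C := t.length / K with hCdef
    have hLC : t.length = K * C := (Nat.mul_div_cancel' hdvdN).symm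
    have hKlt : K < t.length := by omega
    have hCpos : 0 < C := Nat.div_pos (le_of_lt hKlt) hKpos
    have hcols : PySem.Int.floordiv ((t.length : Nat) : Int) (K : Int) = (C : Int) := by
      rw [hCdef]
      exact_mod_cast PySem.Int.floordiv_natCast t.length K
    rw [hcols]
    simp only [Int.toNat_natCast]
    have hmod_id :
        (((PySem.List.pyRange 0 (K : Int)).map
            (fun i => PySem.List.slice t (some (i * (C : Int))) (some ((i+1) * (C : Int))))).modify
          (((K : Int) - 1).toNat) (fun r => pvFillFuel C r (C : Int)))
        = ((PySem.List.pyRange 0 (K : Int)).map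
            (fun i => PySem.List.slice t (some (i * (C : Int))) (some ((i+1) * (C : Int))))) := by
      apply pvModify_congr_id
      intro row hrow
      obtain ⟨j, hj, hrow⟩ := List.mem_map.mp hrow
      have hjb : 0 ≤ j ∧ j < (K : Int) := (PySem.List.mem_pyRange_one).mp hj
      have hjn : j = ((j.toNat : Nat) : Int) := by omega
      apply pvFillFuel_id
      subst hrow
      rw [hjn]
      have e1 : ((j.toNat : Nat) : Int) * (C : Int) = ((j.toNat * C : Nat) : Int) := by push_cast; ring
      have e2 : (((j.toNat : Nat) : Int) + 1) * (C : Int) = ((j.toNat * C + C : Nat) : Int) := by push_cast; ring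
      rw [e1, e2, PySem.List.slice_natCast]
      have e3 : j.toNat * C + C - j.toNat * C = C := by omega
      rw [e3]
      have hfits : j.toNat * C + C ≤ t.length := by
        rw [hLC]
        calc j.toNat * C + C = (j.toNat + 1) * C := by ring
          _ ≤ K * C := Nat.mul_le_mul_right _ (by omega)
      simp [List.length_take, List.length_drop]
      omega
    rw [hmod_id]
    have hA := pvGridRead t ' ' '_' K C hLC
    have hB : PySem.Chars.join [] ((PySem.List.pyRange 0 (C : Int)).map
          (fun i => (PySem.List.slice? (PySem.Chars.replace t [' '] ['_']) (some i) none (C : Int)).getD []))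
        = (List.range C).flatMap (fun i => (List.range K).map
            (fun k => (t.map (fun c => if c = ' ' then '_' else c)).getD (k * C + i) ' ')) := by
      rw [pvReplace_single]
      exact pvStrideRead (t.map (fun c => if c = ' ' then '_' else c)) K C hCpos (by simpa using hLC)
    rw [hA, hB]
  | true =>
    have hpre' : key ≠ 0 ∧ PySem.Int.mod ((s.toList.length : Nat) : Int) key = 0 := by
      simpa [Pre_cipher12] using hpre
    obtain ⟨hk0, hmod⟩ := hpre'
    unfold cipher12 cipher12_alt
    simp only [reduceIte]
    rw [if_neg (not_not_intro hmod), if_neg (not_not_intro hmod)]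
    rcases lt_trichotomy key 0 with hneg | hzero | hpos
    · rw [PySem.List.pyRange_one_eq_nil (show key ≤ (0 : Int) by omega)]
      simp
    · exact absurd hzero hk0
    · have hkey : key = ((key.toNat : Nat) : Int) := by omega
      set K := key.toNat with hKdef
      have hKpos : 0 < K := by omega
      rw [hkey] at hmod ⊢
      have hdvdN : K ∣ s.toList.length := by
        have hdvd : ((K : Nat) : Int) ∣ ((s.toList.length : Nat) : Int) :=
          (PySem.Int.mod_eq_zero_iff_dvd _ _).mp hmod
        exact_mod_cast hdvd
      set R := s.toList.length / K with hRdef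
      have hLR : s.toList.length = R * K := (Nat.div_mul_cancel hdvdN).symm
      have hrows : PySem.Int.floordiv ((s.toList.length : Nat) : Int) (K : Int) = (R : Int) := by
        rw [hRdef]
        exact_mod_cast PySem.Int.floordiv_natCast s.toList.length K
      rw [hrows]
      have hA := pvGridRead s.toList '_' ' ' R K hLR
      have hB : PySem.Chars.join [] ((PySem.List.pyRange 0 (K : Int)).map
            (fun i => (PySem.List.slice? (PySem.Chars.replace s.toList ['_'] [' ']) (some i) none (K : Int)).getD []))
          = (List.range K).flatMap (fun i => (List.range R).map
              (fun k => (s.toList.map (fun c => if c = '_' then ' ' else c)).getD (k * K + i) ' ')) := by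
        rw [pvReplace_single]
        exact pvStrideRead (s.toList.map (fun c => if c = '_' then ' ' else c)) R K hKpos (by simpa using hLR)
      rw [hA, hB]
      simp
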